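-- pv_equiv track=rewrite | github.com/Hunnit-kor/python-for-codingtest | 11/chapter11-6.py | solution
-- ===== SOURCE A (Python) =====
-- import heapq
--
-- def solution(food_times,k):
--   #food_times배열의 합이 k보다 작으면 k초후에 먹을게 없으므로 -1을 리턴
--   if sum(food_times)<= k:
--     return -1
--   q=[]
--   for i in range(len(food_times)):
--     heapq.heappush(q,(food_times[i],i+1))
--   #먹을 음식개수
--   dish=len(food_times)
--   #이전 음식의 시간 담을 변수
--   prev=0
--   #이때까지 먹은 음식 시간 담을 변수
--   sum1=0
--   #우선순위가 높은것부터 한접시씩 없애기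
--   while sum1+(q[0][0]-prev)*dish<=k:
--
--     now=heapq.heappop(q)[0]
--     #prev를 이때 빼주는 이유는 now를 prev에 넣어주는데 위 반복문 실행시 중첩 안되기위해서다
--     sum1+=(now-prev)*dish
--     prev=now
--     dish-=1
--
--   leftovers=sorted(q,key=lambda x : x[1])
--   answer=leftovers[(k-sum1)%len(leftovers)][1]
--
--   return answer
-- ===== SOURCE B (Python) =====
-- def solution(food_times, k):
--     if sum(food_times) <= k:
--         return -1
--     n = len(food_times)
--
--     def cost(r):
--         # total seconds consumed if the rotation runs until every dish has lost min(t, r) seconds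
--         return sum(t if t < r else r for t in food_times)
--
--     # binary search for the largest r with cost(r) <= k
--     lo = k // n          # cost(lo) <= n*lo <= k
--     hi = max(food_times)  # cost(hi) = sum(food_times) > k
--     while lo + 1 < hi:
--         mid = (lo + hi) // 2
--         if cost(mid) <= k:
--             lo = mid
--         else:
--             hi = mid
--     survivors = [i + 1 for i, t in enumerate(food_times) if t > lo]
--     return survivors[(k - cost(lo)) % len(survivors)]
-- ===== Notes on version B (the rewrite author's own statement) =====
-- stated objective: alternative
-- what changed: Replaces A's heap simulation (heappush loop, then a destructive heappop sweep over ascending times, then sorting the surviving heap entries by index) with a binary search for the largest level r such that sum(min(t, r)) <= k; the survivors are then just a filter of the original list by t > r, so B needs no heap and no sorting at all.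
import Mathlib
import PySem

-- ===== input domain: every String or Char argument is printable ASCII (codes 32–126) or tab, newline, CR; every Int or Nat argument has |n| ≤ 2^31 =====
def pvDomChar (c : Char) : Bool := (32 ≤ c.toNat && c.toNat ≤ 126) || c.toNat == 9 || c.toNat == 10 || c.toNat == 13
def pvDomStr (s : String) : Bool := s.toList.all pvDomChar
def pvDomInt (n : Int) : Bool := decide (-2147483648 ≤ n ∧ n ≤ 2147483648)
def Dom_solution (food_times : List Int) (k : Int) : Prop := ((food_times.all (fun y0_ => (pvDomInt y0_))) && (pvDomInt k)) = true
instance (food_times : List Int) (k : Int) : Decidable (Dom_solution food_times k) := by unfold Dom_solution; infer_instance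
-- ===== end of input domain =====

-- B replaces A's heap sweep (heappush loop + destructive heappop loop + sort of the survivors)
-- by a binary search for the largest level r with sum(min(t,r)) <= k; survivors are a plain
-- filter by t > r, no heap and no sorting. Return values proved equal on Pre_.

-- ===== PORT A =====
-- heapq is not in PySem; it is modeled by keeping q ordered by Python's tuple order
-- (ascending (time, index)): since all pushes happen before all pops and the pairs are
-- distinct (distinct indices), heappop's observable pop sequence is exactly this order,
-- so the model is exact for A's use of the heap.
def heapPush (x : Int × Int) : List (Int × Int) → List (Int × Int)
  | [] => [x]
  | y :: ys => if x.1 < y.1 ∨ (x.1 = y.1 ∧ x.2 < y.2) then x :: y :: ys else y :: heapPush x ys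

def loopA (k : Int) : List (Int × Int) → Int → Int → Int → Int
  | [], _, _, _ => 0   -- Python: q[0] on an empty q raises IndexError; Pre_ excludes the only input reaching it
  | (t, i) :: rest, dish, prev, sum1 =>
    if sum1 + (t - prev) * dish ≤ k then
      loopA k rest (dish - 1) t (sum1 + (t - prev) * dish)
    else
      let leftovers := PySem.List.sorted ((t, i) :: rest) (fun p => p.2)
      -- the index is in range (0 ≤ (k-sum1) % len < len, leftovers ≠ []), so pyGetD is exact
      (PySem.List.pyGetD leftovers (PySem.Int.mod (k - sum1) (PySem.List.len leftovers)) (0, 0)).2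

def solution (food_times : List Int) (k : Int) : Int :=
  if food_times.sum ≤ k then -1
  else
    let q := (PySem.List.pyRange 0 (PySem.List.len food_times) 1).foldl
      (fun q i => heapPush (PySem.List.pyGetD food_times i 0, i + 1) q) []
    loopA k q (PySem.List.len food_times) 0 0

-- ===== PORT B =====
-- Source B's helper cost(r) = sum(t if t < r else r for t in food_times)
def costB (xs : List Int) (r : Int) : Int := (xs.map (fun t => if t < r then t else r)).sum

-- Source B's while loop: binary search keeping cost(lo) <= k < cost(hi)
def bsearchB (xs : List Int) (k lo hi : Int) : Int :=
  if _h : lo + 1 < hi then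
    if costB xs (PySem.Int.floordiv (lo + hi) 2) ≤ k then
      bsearchB xs k (PySem.Int.floordiv (lo + hi) 2) hi
    else
      bsearchB xs k lo (PySem.Int.floordiv (lo + hi) 2)
  else lo
termination_by (hi - lo).toNat
decreasing_by
  · have h2 := @PySem.Int.floordiv_two_mid_bounds (lo + 1) (hi - 1) (by omega)
    rw [show lo + 1 + (hi - 1) = lo + hi from by ring] at h2
    omega
  · have h2 := @PySem.Int.floordiv_two_mid_bounds (lo + 1) (hi - 1) (by omega)
    rw [show lo + 1 + (hi - 1) = lo + hi from by ring] at h2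
    omega

def solution_alt (food_times : List Int) (k : Int) : Int :=
  if food_times.sum ≤ k then -1
  else
    -- k // n: Python raises ZeroDivisionError for n = 0, max([]) raises ValueError;
    -- the only input reaching them (food_times = [] with k < 0) is excluded by Pre_
    let lo := PySem.Int.floordiv k (PySem.List.len food_times)
    let hi := (PySem.List.max? food_times (fun t => t)).getD 0
    let r := bsearchB food_times k lo hi
    let survivors := ((PySem.List.enumerate food_times).filter
      (fun p => decide (p.2 > r))).map (fun p => p.1 + 1)
    -- the index is in range (0 ≤ _ % len < len, survivors ≠ []), so pyGetD is exact
    PySem.List.pyGetD survivors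
      (PySem.Int.mod (k - costB food_times r) (PySem.List.len survivors)) 0

-- ===== PRECONDITION & SPEC =====
-- Pre_ excludes only the empty list with k < 0, where A raises IndexError (q[0]) and B
-- raises ZeroDivisionError (k // 0).
def Pre_solution (food_times : List Int) (k : Int) : Prop := food_times ≠ [] ∨ 0 ≤ k
instance (food_times : List Int) (k : Int) : Decidable (Pre_solution food_times k) := by unfold Pre_solution; infer_instance
def pvWitness_solution : List Int × Int := ([3, 1, 2], 5)
def Spec_solution (food_times : List Int) (k : Int) (out : Int) : Prop := out = solution_alt food_times k
instance (food_times : List Int) (k : Int) (out : Int) : Decidable (Spec_solution food_times k out) := by unfold Spec_solution; infer_instance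

-- ===== CLAIM (what is proved, stated in full; the proofs are below) =====
def Claim_equal_solution : Prop := ∀ (food_times : List Int) (k : Int), Dom_solution food_times k → Pre_solution food_times k → Spec_solution food_times k (solution food_times k)

-- ===== LEMMAS AND PROOFS =====

-- the (time, index) pair list both programs conceptually work over
def pairsOf (xs : List Int) : List (Int × Int) :=
  (PySem.List.enumerate xs).map (fun q => (q.2, q.1 + 1))

-- B's tail computation, as solution_alt performs it after the binary search
def tailAlt (xs : List Int) (k r : Int) : Int :=
  let survivors := ((PySem.List.enumerate xs).filter
    (fun p => decide (p.2 > r))).map (fun p => p.1 + 1)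
  PySem.List.pyGetD survivors
    (PySem.Int.mod (k - costB xs r) (PySem.List.len survivors)) 0

-- ===== basic costB facts =====
theorem costB_append (a b : List Int) (r : Int) :
    costB (a ++ b) r = costB a r + costB b r := by
  simp [costB]

theorem costB_perm {xs ys : List Int} (h : xs.Perm ys) (r : Int) :
    costB xs r = costB ys r := (h.map _).sum_eq

theorem costB_mono (xs : List Int) {r s : Int} (h : r ≤ s) :
    costB xs r ≤ costB xs s := by
  induction xs with
  | nil => simp [costB]
  | cons x t ih =>
    simp only [costB, List.map_cons, List.sum_cons] at *
    split_ifs <;> omega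

theorem costB_eq_sum (xs : List Int) {M : Int} (h : ∀ t ∈ xs, t ≤ M) :
    costB xs M = xs.sum := by
  induction xs with
  | nil => rfl
  | cons x t ih =>
    have hx := h x (List.mem_cons_self)
    simp only [costB, List.map_cons, List.sum_cons] at *
    rw [ih (fun y hy => h y (List.mem_cons_of_mem x hy))]
    split_ifs <;> omega

theorem costB_eq_mul (xs : List Int) {M : Int} (h : ∀ t ∈ xs, M ≤ t) :
    costB xs M = (xs.length : Int) * M := by
  induction xs with
  | nil => simp [costB]
  | cons x t ih =>
    have hx := h x (List.mem_cons_self)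
    simp only [costB, List.map_cons, List.sum_cons, List.length_cons] at *
    rw [ih (fun y hy => h y (List.mem_cons_of_mem x hy))]
    push_cast
    split_ifs <;> [omega; ring]

theorem costB_le_mul (xs : List Int) (r : Int) :
    costB xs r ≤ (xs.length : Int) * r := by
  induction xs with
  | nil => simp [costB]
  | cons x t ih =>
    simp only [costB, List.map_cons, List.sum_cons, List.length_cons] at *
    push_cast
    ring_nf
    split_ifs <;> nlinarith [ih]

-- ===== binary search bracket =====
theorem bsearchB_spec (xs : List Int) (k : Int) :
    ∀ (n : Nat) (lo hi : Int), (hi - lo).toNat ≤ n →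
      costB xs lo ≤ k → k < costB xs hi → lo < hi →
      costB xs (bsearchB xs k lo hi) ≤ k ∧ k < costB xs (bsearchB xs k lo hi + 1) := by
  intro n
  induction n with
  | zero => intro lo hi hn _ _ hlh; omega
  | succ n ih =>
    intro lo hi hn hlo hhi hlh
    rw [bsearchB]
    have h2 := @PySem.Int.floordiv_two_mid_bounds (lo + 1) (hi - 1)
    split_ifs with h1 hc
    · have h2' := h2 (by omega)
      rw [show lo + 1 + (hi - 1) = lo + hi from by ring] at h2'
      exact ih _ hi (by omega) hc hhi (by omega)
    · have h2' := h2 (by omega)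
      rw [show lo + 1 + (hi - 1) = lo + hi from by ring] at h2'
      exact ih lo _ (by omega) hlo (by omega) (by omega)
    · refine ⟨hlo, ?_⟩
      rw [show lo + 1 = hi from by omega]
      exact hhi

-- ===== A-side heap model facts =====
theorem heapPush_perm (x : Int × Int) (q : List (Int × Int)) :
    (heapPush x q).Perm (x :: q) := by
  induction q with
  | nil => exact List.Perm.refl _
  | cons y ys ih =>
    rw [heapPush]
    split_ifs with h
    · exact List.Perm.refl _
    · exact (ih.cons y).trans (List.Perm.swap x y ys)

theorem heapPush_pairwise (x : Int × Int) (q : List (Int × Int))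
    (h : q.Pairwise (fun a b => a.1 ≤ b.1)) :
    (heapPush x q).Pairwise (fun a b => a.1 ≤ b.1) := by
  induction q with
  | nil => simp [heapPush]
  | cons y ys ih =>
    rw [List.pairwise_cons] at h
    rw [heapPush]
    split_ifs with hc
    · refine List.pairwise_cons.mpr ⟨?_, List.pairwise_cons.mpr h⟩
      intro z hz
      rcases List.mem_cons.mp hz with rfl | hz
      · omega
      · have := h.1 z hz; omega
    · refine List.pairwise_cons.mpr ⟨?_, ih h.2⟩
      intro z hz
      rcases List.mem_cons.mp ((heapPush_perm x ys).mem_iff.mp hz) with rfl | hz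
      · omega
      · exact h.1 z hz

theorem foldl_heapPush_perm (l : List (Int × Int)) :
    ∀ acc, (l.foldl (fun q x => heapPush x q) acc).Perm (acc ++ l) := by
  induction l with
  | nil => intro acc; simp
  | cons x t ih =>
    intro acc
    simp only [List.foldl_cons]
    exact (ih (heapPush x acc)).trans
      (((heapPush_perm x acc).append_right t).trans List.perm_middle.symm)

theorem foldl_heapPush_pairwise (l : List (Int × Int)) :
    ∀ acc, acc.Pairwise (fun a b => a.1 ≤ b.1) →
      (l.foldl (fun q x => heapPush x q) acc).Pairwise (fun a b => a.1 ≤ b.1) := by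
  induction l with
  | nil => intro acc h; exact h
  | cons x t ih => intro acc h; exact ih _ (heapPush_pairwise x acc h)

-- the list of pairs A pushes (in order) is pairsOf xs
theorem pairs_lists_eq (xs : List Int) :
    (PySem.List.pyRange 0 (PySem.List.len xs) 1).map
        (fun i => (PySem.List.pyGetD xs i 0, i + 1)) = pairsOf xs := by
  rw [pairsOf, PySem.List.enumerate_eq_map_pyRange xs 0, List.map_map]
  rfl

-- ===== the main lockstep lemma: A's pop loop ends in B's filtered-survivor lookup =====
theorem loopA_run (xs : List Int) (k r : Int)
    (hk : ¬ xs.sum ≤ k) (hne : xs ≠ [])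
    (hr1 : costB xs r ≤ k) (hr2 : k < costB xs (r + 1)) :
    ∀ (Q F : List (Int × Int)) (p S : Int),
      (F ++ Q).Perm (pairsOf xs) →
      (∀ q ∈ F, q.1 ≤ p) →
      Q.Pairwise (fun a b => a.1 ≤ b.1) →
      ((F = [] ∧ p = 0 ∧ S = 0) ∨ (S ≤ k ∧ ∀ q ∈ Q, p ≤ q.1)) →
      S = (F.map (fun q => q.1)).sum + (Q.length : Int) * p →
      loopA k Q (Q.length : Int) p S = tailAlt xs k r := by
  intro Q
  induction Q with
  | nil =>
    intro F p S hPE hF _ hS hsum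
    exfalso
    have hxs : (F.map (fun q => q.1)).Perm xs := by
      have h1 := (by simpa using hPE : F.Perm (pairsOf xs)).map (fun q => q.1)
      simpa [pairsOf, List.map_map, Function.comp_def, PySem.List.map_snd_enumerate] using h1
    rcases hS with ⟨hFe, _, _⟩ | ⟨hSk, _⟩
    · subst hFe
      have hl := hxs.length_eq
      simp only [List.map_nil, List.length_nil] at hl
      exact hne (List.eq_nil_of_length_eq_zero hl.symm)
    · have : (F.map (fun q => q.1)).sum = xs.sum := hxs.sum_eq
      simp only [List.length_nil, Nat.cast_zero, zero_mul, add_zero] at hsum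
      omega
  | cons hd Q' ih =>
    intro F p S hPE hF hQ hS hsum
    obtain ⟨t, i⟩ := hd
    have hQhead : ∀ q ∈ (t, i) :: Q', t ≤ q.1 := by
      intro q hq
      rcases List.mem_cons.mp hq with rfl | hq
      · exact le_refl t
      · exact (List.pairwise_cons.mp hQ).1 q hq
    have hpt : F = [] ∧ p = 0 ∨ p ≤ t := by
      rcases hS with ⟨h1, h2, _⟩ | ⟨_, h2⟩
      · exact Or.inl ⟨h1, h2⟩
      · exact Or.inr (h2 _ (List.mem_cons_self))
    rw [loopA]
    split_ifs with hcond
    · -- pop (t, i): continue with F ++ [(t,i)]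
      have hrec := ih (F ++ [(t, i)]) t (S + (t - p) * ((Q'.length : Int) + 1))
        (by simpa [List.append_assoc] using hPE)
        (by
          intro q hq
          rcases List.mem_append.mp hq with hq | hq
          · rcases hpt with ⟨hFe, _⟩ | hpt
            · subst hFe; simp at hq
            · exact le_trans (hF q hq) hpt
          · simp only [List.mem_singleton] at hq
            subst hq
            exact le_refl _)
        (List.pairwise_cons.mp hQ).2
        (Or.inr ⟨by
          simp only [List.length_cons] at hcond
          push_cast at hcond
          linarith, (List.pairwise_cons.mp hQ).1⟩)
        (by
          simp only [List.map_append, List.sum_append, List.map_cons, List.sum_cons,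
            List.map_nil, List.sum_nil]
          rw [hsum]
          simp only [List.length_cons]
          push_cast
          ring)
      simp only [List.length_cons] at hcond ⊢
      rw [show ((Q'.length + 1 : Nat) : Int) - 1 = (Q'.length : Int) from by push_cast; ring]
      rw [show S + (t - p) * ((Q'.length + 1 : Nat) : Int)
            = S + (t - p) * ((Q'.length : Int) + 1) from by push_cast; ring]
      exact hrec
    · -- stop: the survivors are exactly the pairs with time > r
      have hm : (0 : Int) < (Q'.length : Int) + 1 := by positivity
      simp only [List.length_cons] at hcond
      have hcond' : k < S + (t - p) * ((Q'.length : Int) + 1) := by push_cast at hcond; omega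
      simp only [List.length_cons] at hsum
      push_cast at hsum
      have hxsperm : ((F ++ (t, i) :: Q').map (fun q => q.1)).Perm xs := by
        have h1 := hPE.map (fun q => q.1)
        simpa [pairsOf, List.map_map, Function.comp_def, PySem.List.map_snd_enumerate] using h1
      have hcost : ∀ s, costB xs s
          = costB (F.map (fun q => q.1)) s + costB (((t, i) :: Q').map (fun q => q.1)) s := by
        intro s
        rw [← costB_perm hxsperm s, List.map_append, costB_append]
      have hQlen : ((((t, i) :: Q').map (fun q => q.1)).length : Int) = (Q'.length : Int) + 1 := by
        simp
      -- k < costB xs t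
      have hkt : k < costB xs t := by
        have hFpart : costB (F.map (fun q => q.1)) t = (F.map (fun q => q.1)).sum := by
          refine costB_eq_sum _ ?_
          intro u hu
          obtain ⟨q, hq, rfl⟩ := List.mem_map.mp hu
          rcases hpt with ⟨hFe, _⟩ | hpt
          · subst hFe; simp at hq
          · exact le_trans (hF q hq) hpt
        have hQpart : costB (((t, i) :: Q').map (fun q => q.1)) t
            = ((Q'.length : Int) + 1) * t := by
          rw [costB_eq_mul _ (by
            intro u hu
            obtain ⟨q, hq, rfl⟩ := List.mem_map.mp hu
            exact hQhead q hq), hQlen]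
        have key : (List.map (fun q => q.1) F).sum + ((Q'.length : Int) + 1) * t
            = S + (t - p) * ((Q'.length : Int) + 1) := by rw [hsum]; ring
        rw [hcost t, hFpart, hQpart]
        linarith [hcond', key]
      have hrt : r < t := by
        by_contra hx
        have := costB_mono xs (s := r) (by omega : t ≤ r)
        omega
      -- every popped pair has time ≤ r
      have hFr : ∀ q ∈ F, q.1 ≤ r := by
        rcases hS with ⟨hFe, _, _⟩ | ⟨hSk, hQge⟩
        · subst hFe; intro q hq; simp at hq
        · have hpr : p ≤ r := by
            by_contra hx
            have hstep : costB xs p = S := by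
              have hFpart : costB (F.map (fun q => q.1)) p = (F.map (fun q => q.1)).sum :=
                costB_eq_sum _ (by
                  intro u hu
                  obtain ⟨q, hq, rfl⟩ := List.mem_map.mp hu
                  exact hF q hq)
              have hQpart : costB (((t, i) :: Q').map (fun q => q.1)) p
                  = ((Q'.length : Int) + 1) * p := by
                rw [costB_eq_mul _ (by
                  intro u hu
                  obtain ⟨q, hq, rfl⟩ := List.mem_map.mp hu
                  exact hQge q hq), hQlen]
              rw [hcost p, hFpart, hQpart, hsum]
            have := costB_mono xs (s := p) (by omega : r + 1 ≤ p)
            omega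
          intro q hq
          exact le_trans (hF q hq) hpr
      -- costB xs r in terms of the loop state
      have hcr : costB xs r = S + ((Q'.length : Int) + 1) * (r - p) := by
        have hFpart : costB (F.map (fun q => q.1)) r = (F.map (fun q => q.1)).sum :=
          costB_eq_sum _ (by
            intro u hu
            obtain ⟨q, hq, rfl⟩ := List.mem_map.mp hu
            exact hFr q hq)
        have hQpart : costB (((t, i) :: Q').map (fun q => q.1)) r
            = ((Q'.length : Int) + 1) * r := by
          rw [costB_eq_mul _ (by
            intro u hu
            obtain ⟨q, hq, rfl⟩ := List.mem_map.mp hu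
            exact le_of_lt (lt_of_lt_of_le hrt (hQhead q hq))), hQlen]
        rw [hcost r, hFpart, hQpart, hsum]
        ring
      -- the survivors list, once and for all
      have hQfilt : ((t, i) :: Q').filter (fun q => decide (q.1 > r)) = (t, i) :: Q' :=
        List.filter_eq_self.mpr (by
          intro q hq
          exact decide_eq_true (lt_of_lt_of_le hrt (hQhead q hq)))
      have hFfilt : F.filter (fun q => decide (q.1 > r)) = [] :=
        List.filter_eq_nil_iff.mpr (by
          intro q hq
          simpa using not_lt.mpr (hFr q hq))
      have hLperm : ((pairsOf xs).filter (fun q => decide (q.1 > r))).Perm ((t, i) :: Q') := by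
        have h1 := (hPE.filter (fun q => decide (q.1 > r))).symm
        rwa [List.filter_append, hFfilt, hQfilt, List.nil_append] at h1
      have hLpair : ((pairsOf xs).filter (fun q => decide (q.1 > r))).Pairwise
          (fun a b => a.2 < b.2) := by
        refine List.Pairwise.filter _ ?_
        refine List.Pairwise.map _ ?_ (PySem.List.pairwise_lt_enumerate xs 0)
        intro a b hab
        simpa using by omega
      have hsortEq : PySem.List.sorted ((t, i) :: Q') (fun q => q.2)
          = (pairsOf xs).filter (fun q => decide (q.1 > r)) :=
        PySem.List.sorted_eq_of_perm_of_pairwise_lt _ _ _ hLperm hLpair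
      -- abbreviate
      set L := (pairsOf xs).filter (fun q => decide (q.1 > r)) with hL
      have hLlen : (L.length : Int) = (Q'.length : Int) + 1 := by
        rw [hLperm.length_eq]; simp
      -- B's survivors = L.map (·.2)
      have hBsurv : ((PySem.List.enumerate xs).filter (fun q => decide (q.2 > r))).map
          (fun q => q.1 + 1) = L.map (fun q => q.2) := by
        simp only [hL, pairsOf, List.filter_map, List.map_map]
        rfl
      -- the two indices agree
      have hidx : PySem.Int.mod (k - costB xs r) ((Q'.length : Int) + 1)
          = PySem.Int.mod (k - S) ((Q'.length : Int) + 1) := by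
        rw [hcr, PySem.Int.mod_eq_emod_of_pos hm, PySem.Int.mod_eq_emod_of_pos hm,
          show k - (S + ((Q'.length : Int) + 1) * (r - p))
            = (k - S) - ((Q'.length : Int) + 1) * (r - p) from by ring,
          Int.sub_mul_emod_self_left]
      have hb0 : 0 ≤ PySem.Int.mod (k - S) ((Q'.length : Int) + 1) :=
        PySem.Int.mod_nonneg _ hm
      have hb1 : PySem.Int.mod (k - S) ((Q'.length : Int) + 1) < (Q'.length : Int) + 1 :=
        PySem.Int.mod_lt _ hm
      show (PySem.List.pyGetD (PySem.List.sorted ((t, i) :: Q') (fun q => q.2)) _ (0, 0)).2 = _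
      rw [hsortEq]
      simp only [tailAlt, hBsurv, PySem.List.len_eq, List.length_map, hLlen, hidx]
      rw [PySem.List.pyGetD_eq_getElem L (0, 0) hb0 (by omega),
        PySem.List.pyGetD_eq_getElem (L.map (fun q => q.2)) 0 hb0
          (by simp only [List.length_map]; omega),
        List.getElem_map]

-- ===== VERDICT (by name: the statement is the Claim_ definition above) =====
theorem solution_spec : Claim_equal_solution := by
  intro xs k _ hpre
  unfold Spec_solution
  by_cases hs : xs.sum ≤ k
  · rw [solution, solution_alt, if_pos hs, if_pos hs]
  · have hne : xs ≠ [] := by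
      intro h
      subst h
      simp only [List.sum_nil] at hs
      rcases hpre with h | h
      · exact h rfl
      · exact hs h
    have hn : 0 < xs.length := List.length_pos_iff.mpr hne
    obtain ⟨M, hM⟩ : ∃ M, PySem.List.max? xs (fun t => t) = some M := by
      cases hmax : PySem.List.max? xs (fun t => t) with
      | none => exact absurd ((PySem.List.max?_eq_none_iff xs _).mp hmax) hne
      | some M => exact ⟨M, rfl⟩
    have hMmax : ∀ y ∈ xs, y ≤ M := PySem.List.max?_isMax hM
    have hcosthi : k < costB xs M := by
      rw [costB_eq_sum xs hMmax]; omega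
    have hcostlo : costB xs (PySem.Int.floordiv k (xs.length : Int)) ≤ k := by
      have h1 := costB_le_mul xs (PySem.Int.floordiv k (xs.length : Int))
      have h2 := PySem.Int.floordiv_mul_add_mod k (xs.length : Int)
      have h3 := PySem.Int.mod_nonneg k (b := (xs.length : Int)) (by exact_mod_cast hn)
      nlinarith
    have hlt : PySem.Int.floordiv k (xs.length : Int) < M := by
      by_contra hx
      have := costB_mono xs (r := M) (s := PySem.Int.floordiv k (xs.length : Int)) (by omega)
      omega
    obtain ⟨hr1, hr2⟩ := bsearchB_spec xs k
      (M - PySem.Int.floordiv k (xs.length : Int)).toNat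
      (PySem.Int.floordiv k (xs.length : Int)) M le_rfl hcostlo hcosthi hlt
    set r := bsearchB xs k (PySem.Int.floordiv k (xs.length : Int)) M with hr
    -- the heap A builds is a fst-sorted permutation of pairsOf xs
    have hfold : (PySem.List.pyRange 0 (PySem.List.len xs) 1).foldl
        (fun q i => heapPush (PySem.List.pyGetD xs i 0, i + 1) q) []
        = (pairsOf xs).foldl (fun q x => heapPush x q) [] := by
      rw [← pairs_lists_eq, List.foldl_map]
    set qL := (pairsOf xs).foldl (fun q x => heapPush x q) [] with hqL
    have hqperm : qL.Perm (pairsOf xs) := by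
      simpa using foldl_heapPush_perm (pairsOf xs) []
    have hqpair : qL.Pairwise (fun a b => a.1 ≤ b.1) :=
      foldl_heapPush_pairwise (pairsOf xs) [] (by simp)
    have hlen : qL.length = xs.length := by
      simpa [pairsOf, PySem.List.length_enumerate] using hqperm.length_eq
    have hrun := loopA_run xs k r hs hne hr1 hr2 qL [] 0 0
      (by simpa using hqperm) (by simp) hqpair (Or.inl ⟨rfl, rfl, rfl⟩) (by simp)
    show solution xs k = solution_alt xs k
    rw [solution, solution_alt, if_neg hs, if_neg hs]
    simp only [PySem.List.len_eq, hM, Option.getD_some, ← hr]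
    have hfold2 : (PySem.List.pyRange 0 (xs.length : Int) 1).foldl
        (fun q i => heapPush (PySem.List.pyGetD xs i 0, i + 1) q) [] = qL := by
      simp only [PySem.List.len_eq] at hfold
      rw [hfold, hqL]
    rw [hfold2]
    have hrun2 : loopA k qL ((xs.length : Int)) 0 0 = tailAlt xs k r := by
      rw [show ((xs.length : Nat) : Int) = ((qL.length : Nat) : Int) from by rw [hlen]]
      exact hrun
    rw [hrun2]
    simp only [tailAlt, PySem.List.len_eq]
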